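-- pv_equiv track=rewrite | github.com/jorgerankov/TDA | Practicas/guiaGreedy.py | maxMex
-- ===== SOURCE A (Python) =====
-- def maxMex(conjunto):
--     conjunto.sort()
--     total_mex = 0
--     vistos = set()
--
--     for i in range(len(conjunto)):
--         vistos.add(conjunto[i])
--         # Calcula el mex del subconjunto {b_1, ..., b_i}
--         mex = 0
--         while mex in vistos:
--             mex += 1
--         total_mex += mex
--     return total_mex
-- ===== SOURCE B (Python) =====
-- def maxMex(conjunto):
--     # Sort in place like A (same observable mutation); then a single pass:
--     # on a sorted list, the prefix-mex increases by one exactly when the new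
--     # element equals the current mex, so no seen-set and no inner scan needed.
--     conjunto.sort()
--     total = 0
--     mex = 0
--     for x in conjunto:
--         if x == mex:
--             mex += 1
--         total += mex
--     return total
-- ===== Notes on version B (the rewrite author's own statement) =====
-- stated objective: alternative
-- what changed: Replaces the seen-set plus restart-from-0 inner mex scan per prefix with a single pass over the sorted list carrying the mex, which on a sorted input advances by one exactly when the element equals it; no set is kept at all.
import Mathlib
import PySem

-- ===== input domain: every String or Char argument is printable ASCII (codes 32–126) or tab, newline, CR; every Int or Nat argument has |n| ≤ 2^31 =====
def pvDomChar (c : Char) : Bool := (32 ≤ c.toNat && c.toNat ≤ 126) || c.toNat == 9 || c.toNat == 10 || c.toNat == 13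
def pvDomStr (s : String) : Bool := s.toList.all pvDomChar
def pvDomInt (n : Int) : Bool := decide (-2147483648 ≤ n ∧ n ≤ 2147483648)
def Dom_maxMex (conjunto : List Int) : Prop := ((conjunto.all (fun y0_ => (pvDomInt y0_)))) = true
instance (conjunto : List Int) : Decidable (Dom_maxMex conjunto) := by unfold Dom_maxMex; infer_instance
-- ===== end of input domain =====

-- B replaces A's per-prefix restart-from-0 mex scan over a seen-set with a single pass
-- carrying the mex across the sorted list (no seen-set, no inner scan).
-- A sorts its argument in place; the equivalence proved here is about the RETURN value
-- (B performs the same in-place sort in Python).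

-- ===== PORT A =====
-- 'while mex in vistos: mex += 1': fueled transliteration; each successful membership
-- test consumes a distinct element of vistos, so fuel |vistos|+1 makes it exact.
def pvMexWhile : Nat → Int → PySem.Set Int → Int
  | 0, mex, _ => mex
  | f + 1, mex, vistos =>
      if PySem.Set.contains vistos mex then pvMexWhile f (mex + 1) vistos else mex

def maxMex (conjunto : List Int) : Int :=
  let s := PySem.List.sorted conjunto (fun x => x) false
  let st := (PySem.List.pyRange 0 (PySem.List.len s) 1).foldl
    (fun (p : Int × PySem.Set Int) i =>
      let vistos := PySem.Set.add p.2 (PySem.List.pyGetD s i 0)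
      let mex := pvMexWhile (vistos.length + 1) 0 vistos
      (p.1 + mex, vistos)) (0, PySem.Set.empty)
  st.1

-- ===== PORT B =====
def maxMex_alt (conjunto : List Int) : Int :=
  let s := PySem.List.sorted conjunto (fun x => x) false
  (s.foldl (fun (p : Int × Int) x =>
      let mex := if x = p.2 then p.2 + 1 else p.2
      (p.1 + mex, mex)) (0, 0)).1

-- ===== PRECONDITION & SPEC =====
def Spec_maxMex (conjunto : List Int) (out : Int) : Prop := out = maxMex_alt conjunto
instance (conjunto : List Int) (out : Int) : Decidable (Spec_maxMex conjunto out) := by unfold Spec_maxMex; infer_instance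

-- ===== CLAIM (what is proved, stated in full; the proofs are below) =====
def Claim_equal_maxMex : Prop := ∀ (conjunto : List Int), Dom_maxMex conjunto → Spec_maxMex conjunto (maxMex conjunto)

-- ===== LEMMAS AND PROOFS =====

-- The while loop returns m when everything in [j, m) is in vistos, m is not, and fuel suffices.
theorem pvMexWhile_eq (f : Nat) (j m : Int) (v : PySem.Set Int)
    (hjm : j ≤ m) (hf : (m - j).toNat < f)
    (hlt : ∀ k : Int, j ≤ k → k < m → k ∈ v) (hnm : m ∉ v) :
    pvMexWhile f j v = m := by
  induction f generalizing j with
  | zero => omega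
  | succ f ih =>
      rcases eq_or_lt_of_le hjm with rfl | hjm'
      · simp [pvMexWhile, hnm]
      · have hc : PySem.Set.contains v j = true := by
          simp [hlt j le_rfl hjm']
        simp only [pvMexWhile, hc, if_true]
        exact ih (j + 1) (by omega) (by omega)
          (fun k hk1 hk2 => hlt k (by omega) hk2)

-- 0..m-1 distinct integers inside the nodup list v force m ≤ |v|.
theorem mex_le_card (m : Int) (v : PySem.Set Int) (hm0 : 0 ≤ m)
    (hlt : ∀ k : Int, 0 ≤ k → k < m → k ∈ v) : m.toNat ≤ v.length := by
  have hsub : ((List.range m.toNat).map (Int.ofNat)) ⊆ v := by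
    intro y hy
    simp only [List.mem_map, List.mem_range] at hy
    obtain ⟨k, hk, rfl⟩ := hy
    exact hlt k (by omega) (by omega)
  have hnd' : ((List.range m.toNat).map (Int.ofNat)).Nodup :=
    (List.nodup_range).map (fun a b h => Int.ofNat.inj h)
  have := (List.subperm_of_subset hnd' hsub).length_le
  simpa using this

-- Main loop invariant: with vistos = set of the processed (sorted) prefix, every element
-- of vistos ≤ every remaining element, and m the mex of vistos, the two folds agree.
theorem loop_eq (l : List Int) (t m : Int) (v : PySem.Set Int)
    (hsort : l.Pairwise (· ≤ ·))
    (hlow : ∀ y ∈ v, ∀ x ∈ l, y ≤ x)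
    (hnd : v.Nodup) (hm0 : 0 ≤ m)
    (hlt : ∀ k : Int, 0 ≤ k → k < m → k ∈ v) (hnm : m ∉ v) :
    (l.foldl (fun (p : Int × PySem.Set Int) x =>
        let vistos := PySem.Set.add p.2 x
        let mex := pvMexWhile (vistos.length + 1) 0 vistos
        (p.1 + mex, vistos)) (t, v)).1
    = (l.foldl (fun (p : Int × Int) x =>
        let mex := if x = p.2 then p.2 + 1 else p.2
        (p.1 + mex, mex)) (t, m)).1 := by
  induction l generalizing t m v with
  | nil => rfl
  | cons x l ih =>
      rcases List.pairwise_cons.mp hsort with ⟨hx, hsort'⟩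
      have hxm : ∀ y ∈ v, y ≤ x := fun y hy => hlow y hy x (List.mem_cons_self ..)
      set v' := PySem.Set.add v x with hv'
      set m' : Int := if x = m then m + 1 else m with hm'
      have hmemv' : ∀ y, y ∈ v' ↔ y ∈ v ∨ y = x := fun y => PySem.Set.mem_add v x y
      have hnd' : v'.Nodup := PySem.Set.nodup_add v x hnd
      have hm0' : 0 ≤ m' := by simp only [hm']; split <;> omega
      have hlt' : ∀ k : Int, 0 ≤ k → k < m' → k ∈ v' := by
        intro k hk0 hkm
        by_cases hxm' : x = m
        · rw [hm', if_pos hxm'] at hkm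
          rcases lt_or_eq_of_le (by omega : k ≤ m) with h | h
          · exact (hmemv' k).mpr (Or.inl (hlt k hk0 h))
          · exact (hmemv' k).mpr (Or.inr (by omega))
        · rw [hm', if_neg hxm'] at hkm
          exact (hmemv' k).mpr (Or.inl (hlt k hk0 hkm))
      have hnm' : m' ∉ v' := by
        intro hmem
        by_cases hxm' : x = m
        · rw [hm', if_pos hxm'] at hmem
          rcases (hmemv' (m + 1)).mp hmem with h | h
          · have := hxm _ h; omega
          · omega
        · rw [hm', if_neg hxm'] at hmem
          rcases (hmemv' m).mp hmem with h | h
          · exact hnm h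
          · exact hxm' h.symm
      have hmex : pvMexWhile (v'.length + 1) 0 v' = m' := by
        apply pvMexWhile_eq _ _ _ _ hm0'
          (by have := mex_le_card m' v' hm0' hlt'; omega)
          (fun k hk1 hk2 => hlt' k hk1 hk2) hnm'
      rw [hv'] at hmex
      have hstep : (let vistos := PySem.Set.add v x
          let mex := pvMexWhile (vistos.length + 1) 0 vistos
          ((t + mex : Int), vistos)) = (t + m', v') := by
        simp only [hv', hmex]
      have hstep' : (let mex := if x = m then m + 1 else m
          ((t + mex : Int), mex)) = (t + m', m') := by
        rw [hm']
      simp only [List.foldl_cons]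
      rw [hstep, hstep']
      exact ih (t + m') m' v' hsort'
        (by
          intro y hy z hz
          rcases (hmemv' y).mp hy with h | h
          · exact hlow y h z (List.mem_cons_of_mem _ hz)
          · exact h ▸ hx z hz)
        hnd' hm0' hlt' hnm'

-- ===== VERDICT (by name: the statement is the Claim_ definition above) =====
theorem maxMex_spec : Claim_equal_maxMex := by
  intro conjunto _
  unfold Spec_maxMex maxMex maxMex_alt
  simp only []
  rw [PySem.List.foldl_pyRange_zero_pyGetD (PySem.List.sorted conjunto (fun x => x) false) 0
    (fun (p : Int × PySem.Set Int) x =>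
      (p.1 + pvMexWhile ((PySem.Set.add p.2 x).length + 1) 0 (PySem.Set.add p.2 x),
        PySem.Set.add p.2 x))
    (0, PySem.Set.empty)]
  exact loop_eq _ 0 0 PySem.Set.empty
    (by simpa using PySem.List.sorted_pairwise conjunto (fun x => x))
    (by intro y hy; simp [PySem.Set.empty] at hy)
    (by simp [PySem.Set.empty]) le_rfl
    (by intro k h1 h2; omega)
    (by simp [PySem.Set.empty])
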